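-- pv_equiv track=rewrite | github.com/JakobLien/mytxs | mytxs/utils/utils.py | getStemmegrupper
-- ===== SOURCE A (Python) =====
-- def getStemmegrupper(stemmefordeling, lengde=2, ekstraDybde=0):
--     '''
--     Stemmefordeling er 'SA', 'TB' eller 'SATB'.
--     Lengde er lengden av strengene vi skal ha. Dybde hiver på dypere lengder i tillegg.
--     Alt kommer uansett i rett rekkefølge, f.eks. ['1S', '11S', '21S', '2S'] osv.
--     '''
--     stemmegrupper = ','.join(stemmefordeling)
--
--     for l in range(1, lengde+ekstraDybde):
--         if l < lengde:
--             # Bare øk lengden av alt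
--             stemmegrupper = ','.join([f'1{s},2{s}' for s in stemmegrupper.split(',')])
--         else:
--             # Øk og dupliser de lengste strengene
--             stemmegrupper = ','.join([(f'{s},1{s},2{s}' if len(s) == l else s) for s in stemmegrupper.split(',')])
--
--     return stemmegrupper.split(',')
-- ===== SOURCE B (Python) =====
-- def getStemmegrupper(stemmefordeling, lengde=2, ekstraDybde=0):
--     '''Preorder DFS over the prefix tree of voice labels instead of the
--     level-by-level join/split string expansion; same ordered result.'''
--     N = lengde + ekstraDybde
--
--     def expand(s, l):
--         if N <= l:
--             return [s]
--         if l < lengde: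
--             return expand('1' + s, l + 1) + expand('2' + s, l + 1)
--         if len(s) == l:
--             return [s] + expand('1' + s, l + 1) + expand('2' + s, l + 1)
--         return [s]
--
--     out = []
--     for s in ','.join(stemmefordeling).split(','):
--         out.extend(expand(s, 1))
--     return out
-- ===== Notes on version B (the rewrite author's own statement) =====
-- stated objective: alternative
-- what changed: Replaces A's level-by-level iterative join/split string expansion (re-splitting and re-joining the whole comma-string once per level) by a recursive preorder DFS over the label prefix tree that emits the ordered list directly.
import Mathlib
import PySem

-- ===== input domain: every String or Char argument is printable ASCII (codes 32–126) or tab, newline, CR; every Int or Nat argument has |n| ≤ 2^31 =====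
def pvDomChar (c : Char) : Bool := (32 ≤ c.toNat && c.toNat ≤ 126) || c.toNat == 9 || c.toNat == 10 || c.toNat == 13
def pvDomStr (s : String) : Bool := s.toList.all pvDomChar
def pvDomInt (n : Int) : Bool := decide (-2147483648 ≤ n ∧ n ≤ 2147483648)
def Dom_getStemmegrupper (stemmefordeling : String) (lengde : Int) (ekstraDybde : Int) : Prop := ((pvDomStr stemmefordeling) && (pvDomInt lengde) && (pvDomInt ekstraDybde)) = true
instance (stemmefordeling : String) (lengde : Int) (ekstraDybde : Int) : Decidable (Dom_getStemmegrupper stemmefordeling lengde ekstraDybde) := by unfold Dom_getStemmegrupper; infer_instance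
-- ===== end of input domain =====

-- B replaces A's level-by-level join/split string expansion by a preorder DFS over the
-- label prefix tree (objective: alternative decomposition producing the same ordered list).

-- ===== PORT A =====
-- the body of A's for-loop: one level of join/split expansion of the comma-string state
def pvStepA (lengde : Int) (stemmegrupper : List Char) (l : Int) : List Char :=
  if l < lengde then
    PySem.Chars.join [','] ((PySem.Chars.splitOn stemmegrupper [',']).map
      (fun s => '1' :: (s ++ ',' :: '2' :: s)))
  else
    PySem.Chars.join [','] ((PySem.Chars.splitOn stemmegrupper [',']).map
      (fun s => if (PySem.Chars.len s : Int) = l then s ++ ',' :: '1' :: (s ++ ',' :: '2' :: s) else s))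

def getStemmegrupper (stemmefordeling : String) (lengde : Int) (ekstraDybde : Int) : List String :=
  let init : List Char := PySem.Chars.join [','] (stemmefordeling.toList.map (fun c => [c]))
  let fin : List Char := (PySem.List.pyRange 1 (lengde + ekstraDybde) 1).foldl (pvStepA lengde) init
  (PySem.Chars.splitOn fin [',']).map String.ofList

-- ===== PORT B =====
-- B's recursive helper: preorder DFS, l is the level counter of A's loop
def pvExpand (lengde N : Int) (s : List Char) (l : Int) : List (List Char) :=
  if _h : N ≤ l then [s]
  else if l < lengde then
    pvExpand lengde N ('1' :: s) (l + 1) ++ pvExpand lengde N ('2' :: s) (l + 1)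
  else if (PySem.Chars.len s : Int) = l then
    s :: (pvExpand lengde N ('1' :: s) (l + 1) ++ pvExpand lengde N ('2' :: s) (l + 1))
  else [s]
termination_by (N - l).toNat
decreasing_by all_goals omega

def getStemmegrupper_alt (stemmefordeling : String) (lengde : Int) (ekstraDybde : Int) : List String :=
  let base : List (List Char) :=
    PySem.Chars.splitOn (PySem.Chars.join [','] (stemmefordeling.toList.map (fun c => [c]))) [',']
  (base.flatMap (fun s => pvExpand lengde (lengde + ekstraDybde) s 1)).map String.ofList

-- ===== PRECONDITION & SPEC =====
def Spec_getStemmegrupper (stemmefordeling : String) (lengde : Int) (ekstraDybde : Int) (out : List String) : Prop := out = getStemmegrupper_alt stemmefordeling lengde ekstraDybde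
instance (stemmefordeling : String) (lengde : Int) (ekstraDybde : Int) (out : List String) : Decidable (Spec_getStemmegrupper stemmefordeling lengde ekstraDybde out) := by unfold Spec_getStemmegrupper; infer_instance

-- ===== CLAIM (what is proved, stated in full; the proofs are below) =====
def Claim_equal_getStemmegrupper : Prop := ∀ (stemmefordeling : String) (lengde : Int) (ekstraDybde : Int), Dom_getStemmegrupper stemmefordeling lengde ekstraDybde → Spec_getStemmegrupper stemmefordeling lengde ekstraDybde (getStemmegrupper stemmefordeling lengde ekstraDybde)

-- ===== LEMMAS AND PROOFS =====

-- prepend `pre` onto the head piece (the shape of splitOn's accumulator)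
def pvConsHead (pre : List Char) : List (List Char) → List (List Char)
  | [] => [pre]
  | h :: t => (pre ++ h) :: t

-- split on the single character ',' (reference recursion)
def pvSplit1 : List Char → List (List Char)
  | [] => [[]]
  | c :: rest => if c = ',' then [] :: pvSplit1 rest else pvConsHead [c] (pvSplit1 rest)

theorem pvSplit1_ne_nil (l : List Char) : pvSplit1 l ≠ [] := by
  induction l with
  | nil => simp [pvSplit1]
  | cons c rest ih =>
    simp only [pvSplit1]
    split
    · simp
    · cases h : pvSplit1 rest <;> simp [pvConsHead]

theorem pvConsHead_nil_of_ne {xs : List (List Char)} (h : xs ≠ []) : pvConsHead [] xs = xs := by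
  cases xs with
  | nil => exact absurd rfl h
  | cons a t => simp [pvConsHead]

theorem pvConsHead_append (a b : List Char) (xs : List (List Char)) :
    pvConsHead (a ++ b) xs = pvConsHead a (pvConsHead b xs) := by
  cases xs <;> simp [pvConsHead]

theorem pvGo_eq (fuel : Nat) : ∀ (l cur : List Char) (acc : List (List Char)),
    l.length ≤ fuel →
    PySem.Chars.splitOn.go [','] fuel l cur acc = acc.reverse ++ pvConsHead cur.reverse (pvSplit1 l) := by
  induction fuel with
  | zero =>
    intro l cur acc h
    have : l = [] := by cases l <;> simp_all
    subst this
    simp [PySem.Chars.splitOn.go, pvSplit1, pvConsHead]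
  | succ n ih =>
    intro l cur acc h
    cases l with
    | nil => simp [PySem.Chars.splitOn.go, pvSplit1, pvConsHead]
    | cons c rest =>
      by_cases hc : c = ','
      · subst hc
        have hpre : List.isPrefixOf [','] (',' :: rest) = true := by
          simp [List.isPrefixOf]
        rw [PySem.Chars.splitOn.go]
        simp only [hpre, if_true, List.length_cons, List.length_nil, List.drop_succ_cons,
          List.drop_zero]
        rw [ih rest [] (cur.reverse :: acc) (by simpa using h)]
        cases hsp : pvSplit1 rest with
        | nil => exact absurd hsp (pvSplit1_ne_nil rest)
        | cons h0 t => simp [pvSplit1, hsp, pvConsHead]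
      · have hpre : List.isPrefixOf [','] (c :: rest) = false := by
          simp [List.isPrefixOf]
          exact fun hh => absurd hh.symm hc
        rw [PySem.Chars.splitOn.go]
        simp only [hpre, Bool.false_eq_true, if_false]
        rw [ih rest (c :: cur) acc (by simpa using h)]
        simp [pvSplit1, hc, List.reverse_cons, pvConsHead_append]

theorem pvSplitOn_eq (l : List Char) : PySem.Chars.splitOn l [','] = pvSplit1 l := by
  unfold PySem.Chars.splitOn
  rw [pvGo_eq (l.length + 1) l [] [] (by omega)]
  simp [pvConsHead_nil_of_ne (pvSplit1_ne_nil l)]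

-- split of a comma-free string is the singleton
theorem pvSplit1_no_comma {a : List Char} (h : ',' ∉ a) : pvSplit1 a = [a] := by
  induction a with
  | nil => simp [pvSplit1]
  | cons c rest ih =>
    have hc : c ≠ ',' := fun hh => h (by simp [hh])
    have hr : ',' ∉ rest := fun hh => h (by simp [hh])
    simp [pvSplit1, hc, ih hr, pvConsHead]

theorem pvSplit1_append {a : List Char} (b : List Char) (h : ',' ∉ a) :
    pvSplit1 (a ++ ',' :: b) = a :: pvSplit1 b := by
  induction a with
  | nil => simp [pvSplit1]
  | cons c rest ih =>
    have hc : c ≠ ',' := fun hh => h (by simp [hh])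
    have hr : ',' ∉ rest := fun hh => h (by simp [hh])
    simp [pvSplit1, hc, ih hr, pvConsHead]

-- every piece of a split is comma-free
theorem pvSplit1_mem_no_comma : ∀ (l : List Char), ∀ x ∈ pvSplit1 l, ',' ∉ x := by
  intro l
  induction l with
  | nil => simp [pvSplit1]
  | cons c rest ih =>
    by_cases hc : c = ','
    · subst hc
      have hsp : pvSplit1 (',' :: rest) = [] :: pvSplit1 rest := by simp [pvSplit1]
      rw [hsp]
      intro x hx
      rcases List.mem_cons.mp hx with hx | hx
      · subst hx; simp
      · exact ih x hx
    · cases hsp0 : pvSplit1 rest with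
      | nil => exact absurd hsp0 (pvSplit1_ne_nil rest)
      | cons h0 t =>
        have hsp : pvSplit1 (c :: rest) = (c :: h0) :: t := by
          simp [pvSplit1, hc, hsp0, pvConsHead]
        rw [hsp]
        intro x hx
        rcases List.mem_cons.mp hx with hx | hx
        · subst hx
          have h0mem : ',' ∉ h0 := ih h0 (by rw [hsp0]; simp)
          intro hmem
          rcases List.mem_cons.mp hmem with h | h
          · exact hc h.symm
          · exact h0mem h
        · exact ih x (by rw [hsp0]; simp [hx])

-- join is a left inverse of split
theorem pvJoin_split1 : ∀ (l : List Char), PySem.Chars.join [','] (pvSplit1 l) = l := by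
  intro l
  induction l with
  | nil => simp [pvSplit1, PySem.Chars.join_singleton]
  | cons c rest ih =>
    by_cases hc : c = ','
    · subst hc
      cases hsp : pvSplit1 rest with
      | nil => exact absurd hsp (pvSplit1_ne_nil rest)
      | cons h0 t =>
        have hstep : pvSplit1 (',' :: rest) = [] :: h0 :: t := by simp [pvSplit1, hsp]
        rw [hstep, PySem.Chars.join_cons_cons]
        rw [hsp] at ih
        simp [ih]
    · cases hsp : pvSplit1 rest with
      | nil => exact absurd hsp (pvSplit1_ne_nil rest)
      | cons h0 t =>
        simp only [pvSplit1, if_neg hc, hsp, pvConsHead]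
        rw [hsp] at ih
        cases t with
        | nil =>
          simp [PySem.Chars.join_singleton] at ih ⊢
          simp [ih]
        | cons t0 ts =>
          rw [PySem.Chars.join_cons_cons] at ih ⊢
          simp [ih]
  -- (the List.cons_append normalisation is handled by simp)

-- split is a left inverse of join on nonempty comma-free lists
theorem pvSplit1_join : ∀ (xs : List (List Char)), xs ≠ [] → (∀ x ∈ xs, ',' ∉ x) →
    pvSplit1 (PySem.Chars.join [','] xs) = xs := by
  intro xs
  induction xs with
  | nil => intro h; exact absurd rfl h
  | cons x t ih =>
    intro _ hcf
    cases t with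
    | nil =>
      rw [PySem.Chars.join_singleton]
      exact pvSplit1_no_comma (hcf x (by simp))
    | cons y ts =>
      rw [PySem.Chars.join_cons_cons]
      have hx : ',' ∉ x := hcf x (by simp)
      have : x ++ [','] ++ PySem.Chars.join [','] (y :: ts)
          = x ++ ',' :: PySem.Chars.join [','] (y :: ts) := by simp
      rw [this, pvSplit1_append _ hx, ih (by simp) (fun z hz => hcf z (by simp [hz]))]

-- join distributes over append of nonempty lists
theorem pvJoin_append : ∀ (as bs : List (List Char)), as ≠ [] → bs ≠ [] →
    PySem.Chars.join [','] (as ++ bs)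
      = PySem.Chars.join [','] as ++ ',' :: PySem.Chars.join [','] bs := by
  intro as
  induction as with
  | nil => intro bs h; exact absurd rfl h
  | cons a t ih =>
    intro bs _ hbs
    cases t with
    | nil =>
      cases bs with
      | nil => exact absurd rfl hbs
      | cons b bs' =>
        rw [List.singleton_append, PySem.Chars.join_cons_cons, PySem.Chars.join_singleton]
        simp
    | cons a' t' =>
      have h1 : (a :: a' :: t') ++ bs = a :: a' :: (t' ++ bs) := by simp
      rw [h1, PySem.Chars.join_cons_cons]
      have h2 : a' :: (t' ++ bs) = (a' :: t') ++ bs := by simp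
      rw [h2, ih bs (by simp) hbs, PySem.Chars.join_cons_cons]
      simp

theorem pvFlatMap_ne_nil {α β : Type} (xs : List α) (f : α → List β)
    (hxs : xs ≠ []) (hf : ∀ x, f x ≠ []) : xs.flatMap f ≠ [] := by
  cases xs with
  | nil => exact absurd rfl hxs
  | cons x t =>
    simp only [List.flatMap_cons]
    intro h
    exact hf x (List.append_eq_nil_iff.mp h).1

-- join over a flatMap = join over the per-element joins
theorem pvJoin_flatMap (f : List Char → List (List Char)) (hf : ∀ x, f x ≠ []) :
    ∀ (xs : List (List Char)), xs ≠ [] →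
    PySem.Chars.join [','] (xs.flatMap f)
      = PySem.Chars.join [','] (xs.map (fun x => PySem.Chars.join [','] (f x))) := by
  intro xs
  induction xs with
  | nil => intro h; exact absurd rfl h
  | cons x t ih =>
    intro _
    cases t with
    | nil => simp [PySem.Chars.join_singleton]
    | cons y ts =>
      have hflat : (y :: ts).flatMap f ≠ [] := pvFlatMap_ne_nil _ f (by simp) hf
      rw [List.flatMap_cons]
      rw [pvJoin_append (f x) ((y :: ts).flatMap f) (hf x) hflat]
      rw [ih (by simp)]
      simp only [List.map_cons]
      rw [PySem.Chars.join_cons_cons]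
      simp

-- the per-element expansion A's step performs, as a list function
def pvStepF (lengde l : Int) (s : List Char) : List (List Char) :=
  if l < lengde then ['1' :: s, '2' :: s]
  else if (s.length : Int) = l then [s, '1' :: s, '2' :: s] else [s]

def pvStepL (lengde l : Int) (xs : List (List Char)) : List (List Char) :=
  xs.flatMap (pvStepF lengde l)

theorem pvStepF_ne_nil (lengde l : Int) (s : List Char) : pvStepF lengde l s ≠ [] := by
  unfold pvStepF; split_ifs <;> simp

theorem pvStepF_join (lengde l : Int) (s : List Char) :
    PySem.Chars.join [','] (pvStepF lengde l s)
      = if l < lengde then '1' :: (s ++ ',' :: '2' :: s)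
        else if (PySem.Chars.len s : Int) = l then s ++ ',' :: '1' :: (s ++ ',' :: '2' :: s) else s := by
  unfold pvStepF
  simp only [PySem.Chars.len_eq]
  split_ifs with h1 h2
  · rw [PySem.Chars.join_cons_cons, PySem.Chars.join_singleton]; simp
  · rw [PySem.Chars.join_cons_cons, PySem.Chars.join_cons_cons, PySem.Chars.join_singleton]; simp
  · rw [PySem.Chars.join_singleton]

-- one loop iteration of A, on the list of pieces
theorem pvStepA_join (lengde l : Int) (xs : List (List Char)) (hne : xs ≠ [])
    (hcf : ∀ x ∈ xs, ',' ∉ x) :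
    pvStepA lengde (PySem.Chars.join [','] xs) l
      = PySem.Chars.join [','] (pvStepL lengde l xs) := by
  unfold pvStepA pvStepL
  rw [pvSplitOn_eq, pvSplit1_join xs hne hcf]
  rw [pvJoin_flatMap (pvStepF lengde l) (pvStepF_ne_nil lengde l) xs hne]
  by_cases hl : l < lengde
  · rw [if_pos hl]
    congr 1
    apply List.map_congr_left
    intro s _
    simp only [pvStepF_join, if_pos hl]
  · rw [if_neg hl]
    congr 1
    apply List.map_congr_left
    intro s _
    simp only [pvStepF_join, if_neg hl]

theorem pvStepL_comma_free (lengde l : Int) (xs : List (List Char))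
    (hcf : ∀ x ∈ xs, ',' ∉ x) : ∀ x ∈ pvStepL lengde l xs, ',' ∉ x := by
  intro x hx
  rcases List.mem_flatMap.mp hx with ⟨s, hs, hxs⟩
  have hscf := hcf s hs
  unfold pvStepF at hxs
  split_ifs at hxs
  · simp at hxs; rcases hxs with h | h <;> subst h <;> simp_all
  · simp at hxs; rcases hxs with h | h | h <;> subst h <;> simp_all
  · simp at hxs; subst hxs; exact hscf

-- the whole loop of A on the string equals the loop on the list of pieces
theorem pvFold_eq (lengde : Int) : ∀ (ls : List Int) (xs : List (List Char)), xs ≠ [] →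
    (∀ x ∈ xs, ',' ∉ x) →
    ls.foldl (pvStepA lengde) (PySem.Chars.join [','] xs)
        = PySem.Chars.join [','] (ls.foldl (fun ys l => pvStepL lengde l ys) xs)
    ∧ ls.foldl (fun ys l => pvStepL lengde l ys) xs ≠ []
    ∧ ∀ x ∈ ls.foldl (fun ys l => pvStepL lengde l ys) xs, ',' ∉ x := by
  intro ls
  induction ls with
  | nil => intro xs hne hcf; exact ⟨rfl, hne, hcf⟩
  | cons l t ih =>
    intro xs hne hcf
    have hne' : pvStepL lengde l xs ≠ [] :=
      pvFlatMap_ne_nil xs _ hne (pvStepF_ne_nil lengde l)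
    have hcf' := pvStepL_comma_free lengde l xs hcf
    have := ih (pvStepL lengde l xs) hne' hcf'
    simpa [List.foldl_cons, pvStepA_join lengde l xs hne hcf] using this

-- one DFS node absorbs one loop iteration of A
theorem pvStepF_expand (lengde N l : Int) (s : List Char)
    (hlen : (s.length : Int) ≤ l) (hl : l < N) :
    (pvStepF lengde l s).flatMap (fun x => pvExpand lengde N x (l + 1))
      = pvExpand lengde N s l := by
  rw [pvExpand]
  rw [dif_neg (by omega)]
  unfold pvStepF
  simp only [PySem.Chars.len_eq]
  split_ifs with h1 h2
  · simp
  · have hstop : pvExpand lengde N s (l + 1) = [s] := by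
      rw [pvExpand]
      simp only [PySem.Chars.len_eq]
      split_ifs with g1 g2 g3 <;> first | rfl | omega
    simp [hstop]
  · have hstop : pvExpand lengde N s (l + 1) = [s] := by
      rw [pvExpand]
      simp only [PySem.Chars.len_eq]
      split_ifs with g1 g2 g3 <;> first | rfl | omega
    simp [hstop]

theorem pvFlatMap_congr {α β : Type} (xs : List α) (f g : α → List β)
    (h : ∀ x ∈ xs, f x = g x) : xs.flatMap f = xs.flatMap g := by
  induction xs with
  | nil => rfl
  | cons x t ih =>
    simp only [List.flatMap_cons, h x (by simp), ih (fun y hy => h y (by simp [hy]))]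

-- A's remaining loop levels = DFS from level l
theorem pvFoldL_eq_expand (lengde N : Int) : ∀ (n : Nat) (l : Int) (xs : List (List Char)),
    (N - l).toNat ≤ n → (∀ s ∈ xs, (s.length : Int) ≤ l) →
    (PySem.List.pyRange l N 1).foldl (fun ys l' => pvStepL lengde l' ys) xs
      = xs.flatMap (fun s => pvExpand lengde N s l) := by
  intro n
  induction n with
  | zero =>
    intro l xs hfuel hlen
    have hNl : N ≤ l := by omega
    rw [PySem.List.pyRange_one_eq_nil hNl]
    simp only [List.foldl_nil]
    have : ∀ s ∈ xs, pvExpand lengde N s l = [s] := by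
      intro s _
      rw [pvExpand, dif_pos hNl]
    rw [pvFlatMap_congr xs _ (fun s => [s]) this]
    simp
  | succ n ih =>
    intro l xs hfuel hlen
    by_cases hNl : N ≤ l
    · rw [PySem.List.pyRange_one_eq_nil hNl]
      simp only [List.foldl_nil]
      have : ∀ s ∈ xs, pvExpand lengde N s l = [s] := by
        intro s _
        rw [pvExpand, dif_pos hNl]
      rw [pvFlatMap_congr xs _ (fun s => [s]) this]
      simp
    · have hlt : l < N := by omega
      rw [PySem.List.pyRange_one_cons hlt]
      simp only [List.foldl_cons]
      rw [ih (l + 1) (pvStepL lengde l xs) (by omega) ?hlen']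
      case hlen' =>
        intro s hs
        rcases List.mem_flatMap.mp hs with ⟨x, hx, hxs⟩
        have hxl := hlen x hx
        unfold pvStepF at hxs
        split_ifs at hxs
        · simp at hxs; rcases hxs with h | h <;> subst h <;> simp <;> omega
        · simp at hxs; rcases hxs with h | h | h <;> subst h <;> simp <;> omega
        · simp at hxs; subst hxs; omega
      unfold pvStepL
      rw [List.flatMap_assoc]
      exact pvFlatMap_congr xs _ _ (fun s hs => pvStepF_expand lengde N l s (hlen s hs) hlt)

-- pieces of the initial split are single characters or empty
theorem pvBase_len : ∀ (cs : List Char),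
    ∀ x ∈ pvSplit1 (PySem.Chars.join [','] (cs.map (fun c => [c]))), x.length ≤ 1 := by
  intro cs
  induction cs with
  | nil =>
    rw [List.map_nil, show PySem.Chars.join [','] ([] : List (List Char)) = [] from rfl]
    simp [pvSplit1]
  | cons c rest ih =>
    cases rest with
    | nil =>
      rw [List.map_cons, List.map_nil, PySem.Chars.join_singleton]
      by_cases hc : c = ','
      · subst hc; simp [pvSplit1]
      · simp [pvSplit1, hc, pvConsHead]
    | cons d ds =>
      rw [List.map_cons, List.map_cons, PySem.Chars.join_cons_cons]
      have ih' : ∀ x ∈ pvSplit1 (PySem.Chars.join [','] ([d] :: ds.map (fun c => [c]))),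
          x.length ≤ 1 := by
        intro x hx
        apply ih
        rw [List.map_cons]
        exact hx
      have hshape : [c] ++ [','] ++ PySem.Chars.join [','] ([d] :: ds.map (fun c => [c]))
          = c :: ',' :: PySem.Chars.join [','] ([d] :: ds.map (fun c => [c])) := by simp
      rw [hshape]
      by_cases hc : c = ','
      · subst hc
        have hsp : pvSplit1 (',' :: ',' :: PySem.Chars.join [','] ([d] :: ds.map (fun c => [c])))
            = [] :: [] :: pvSplit1 (PySem.Chars.join [','] ([d] :: ds.map (fun c => [c]))) := by
          simp [pvSplit1]
        rw [hsp]
        intro x hx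
        rcases List.mem_cons.mp hx with hx | hx
        · simp [hx]
        · rcases List.mem_cons.mp hx with hx | hx
          · simp [hx]
          · exact ih' x hx
      · cases hsp0 : pvSplit1 (PySem.Chars.join [','] ([d] :: ds.map (fun c => [c]))) with
        | nil => exact absurd hsp0 (pvSplit1_ne_nil _)
        | cons h0 t =>
          have hsp : pvSplit1 (c :: ',' :: PySem.Chars.join [','] ([d] :: ds.map (fun c => [c])))
              = [c] :: pvSplit1 (PySem.Chars.join [','] ([d] :: ds.map (fun c => [c]))) := by
            simp [pvSplit1, hc, pvConsHead]
          rw [hsp]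
          intro x hx
          rcases List.mem_cons.mp hx with hx | hx
          · simp [hx]
          · exact ih' x hx

-- ===== VERDICT (by name: the statement is the Claim_ definition above) =====
theorem getStemmegrupper_spec : Claim_equal_getStemmegrupper := by
  intro stemmefordeling lengde ekstraDybde _
  unfold Spec_getStemmegrupper getStemmegrupper getStemmegrupper_alt
  simp only []
  set js := PySem.Chars.join [','] (stemmefordeling.toList.map (fun c => [c])) with hjs
  have hne : pvSplit1 js ≠ [] := pvSplit1_ne_nil js
  have hcf : ∀ x ∈ pvSplit1 js, ',' ∉ x := pvSplit1_mem_no_comma js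
  have hinit : js = PySem.Chars.join [','] (pvSplit1 js) := (pvJoin_split1 js).symm
  rw [hinit]
  obtain ⟨hstr, hne', hcf'⟩ :=
    pvFold_eq lengde (PySem.List.pyRange 1 (lengde + ekstraDybde) 1) (pvSplit1 js) hne hcf
  rw [hstr, pvSplitOn_eq, pvSplit1_join _ hne' hcf']
  rw [pvFoldL_eq_expand lengde (lengde + ekstraDybde) (lengde + ekstraDybde - 1).toNat 1
      (pvSplit1 js) (by omega) ?hlen]
  case hlen =>
    intro s hs
    have := pvBase_len stemmefordeling.toList s hs
    omega
  rw [pvSplitOn_eq, pvSplit1_join _ hne hcf]
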